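-- pv_equiv track=rewrite | github.com/huetran1611/ressupply_luyen | Neighborhood_drone.py | takeAmountBeginAndEndPackage
-- ===== SOURCE A (Python) =====
-- import copy
--
-- def takeAmountBeginAndEndPackage(PackageTrip):
--     ChangePackages = []
--     for i in range(1, len(PackageTrip) + 1):
--         if len(PackageTrip) == i:
--             package = copy.deepcopy(PackageTrip)
--             ChangePackages.append(package)
--         else:
--             package1 = copy.deepcopy(PackageTrip[:i])
--             ChangePackages.append(package1)
--             package2 = copy.deepcopy(PackageTrip[-i:])
--             ChangePackages.append(package2)
--     return ChangePackages
-- ===== SOURCE B (Python) =====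
-- import copy
--
-- def takeAmountBeginAndEndPackage(PackageTrip):
--     # Single pass with growing accumulators: extend the prefix by one element from
--     # the front and the suffix by one element from the reversed list each step;
--     # no slicing anywhere.
--     out = []
--     pref = []
--     suf = []
--     rev = list(reversed(PackageTrip))
--     for k in range(len(PackageTrip) - 1):
--         pref = pref + [copy.deepcopy(PackageTrip[k])]
--         suf = [copy.deepcopy(rev[k])] + suf
--         out.append(pref)
--         out.append(suf)
--     if PackageTrip:
--         out.append(copy.deepcopy(PackageTrip))
--     return out
-- ===== Notes on version B (the rewrite author's own statement) =====
-- stated objective: alternative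
-- what changed: B never slices: one pass keeps two growing accumulators, extending the prefix by the next front element and the suffix by the next element of a reversed copy each iteration, emitting both per step, then the whole list once; A recomputes each prefix/suffix from scratch with slices and deepcopies inside one loop with a length test.
import Mathlib
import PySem

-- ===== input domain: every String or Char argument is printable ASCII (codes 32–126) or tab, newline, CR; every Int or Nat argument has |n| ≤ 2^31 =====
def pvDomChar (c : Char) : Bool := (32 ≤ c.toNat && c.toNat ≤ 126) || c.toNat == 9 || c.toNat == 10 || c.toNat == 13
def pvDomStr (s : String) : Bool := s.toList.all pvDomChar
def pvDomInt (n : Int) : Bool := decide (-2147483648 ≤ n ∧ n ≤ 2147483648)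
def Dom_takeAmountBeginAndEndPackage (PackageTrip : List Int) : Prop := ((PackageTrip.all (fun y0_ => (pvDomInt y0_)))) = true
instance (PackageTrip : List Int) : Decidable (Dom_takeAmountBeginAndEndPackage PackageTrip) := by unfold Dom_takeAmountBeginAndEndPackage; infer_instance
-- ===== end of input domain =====

-- B replaces A's per-iteration slicing with a single pass over two growing
-- accumulators (prefix extended element-by-element from the front, suffix from a
-- reversed copy); objective: alternative.

-- ===== PORT A =====
def takeAmountBeginAndEndPackage (PackageTrip : List Int) : List (List Int) :=
  (PySem.List.pyRange 1 ((PackageTrip.length : Int) + 1) 1).foldl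
    (fun ChangePackages i =>
      if (PackageTrip.length : Int) = i then
        ChangePackages ++ [PackageTrip]
      else
        ChangePackages ++ [PySem.List.slice PackageTrip none (some i)]
          ++ [PySem.List.slice PackageTrip (some (-i)) none]) []

-- ===== PORT B =====
def takeAmountBeginAndEndPackage_alt (PackageTrip : List Int) : List (List Int) :=
  let rev := PackageTrip.reverse
  let st := (PySem.List.pyRange 0 ((PackageTrip.length : Int) - 1) 1).foldl
    (fun (st : List (List Int) × List Int × List Int) k =>
      let pref := st.2.1 ++ [PySem.List.pyGetD PackageTrip k 0]
      let suf := [PySem.List.pyGetD rev k 0] ++ st.2.2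
      (st.1 ++ [pref] ++ [suf], pref, suf)) ([], [], [])
  if PackageTrip = [] then st.1 else st.1 ++ [PackageTrip]

-- ===== PRECONDITION & SPEC =====
def Spec_takeAmountBeginAndEndPackage (PackageTrip : List Int) (out : List (List Int)) : Prop := out = takeAmountBeginAndEndPackage_alt PackageTrip
instance (PackageTrip : List Int) (out : List (List Int)) : Decidable (Spec_takeAmountBeginAndEndPackage PackageTrip out) := by unfold Spec_takeAmountBeginAndEndPackage; infer_instance

-- ===== CLAIM =====
def Claim_equal_takeAmountBeginAndEndPackage : Prop := ∀ (PackageTrip : List Int), Dom_takeAmountBeginAndEndPackage PackageTrip → Spec_takeAmountBeginAndEndPackage PackageTrip (takeAmountBeginAndEndPackage PackageTrip)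

-- ===== LEMMAS AND PROOFS =====

-- canonical form both ports are reduced to
def pvBlocks (P : List Int) (m : Nat) : List (List Int) :=
  (List.range m).flatMap (fun k => [P.take (k + 1), P.drop (P.length - (k + 1))])

-- a foldl whose step only appends a per-element block is a flatMap
theorem pv_foldl_ext_flatMap {α β : Type} (f : List β → α → List β) (g : α → List β)
    (h : ∀ acc x, f acc x = acc ++ g x) :
    ∀ (l : List α) (acc : List β), l.foldl f acc = acc ++ l.flatMap g := by
  intro l
  induction l with
  | nil => simp
  | cons x xs ih => intro acc; simp [List.foldl, h acc x, ih, List.append_assoc]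

theorem pv_flatMap_congr {α β : Type} (l : List α) (f g : α → List β)
    (h : ∀ x ∈ l, f x = g x) : l.flatMap f = l.flatMap g := by
  induction l with
  | nil => rfl
  | cons x xs ih =>
    simp only [List.flatMap_cons, h x (List.mem_cons_self), ih fun y hy => h y (List.mem_cons_of_mem x hy)]

theorem takeAmountBeginAndEndPackage_eq (P : List Int) :
    takeAmountBeginAndEndPackage P =
      pvBlocks P (P.length - 1) ++ (if P = [] then [] else [P]) := by
  unfold takeAmountBeginAndEndPackage
  rw [pv_foldl_ext_flatMap _
      (fun i => if (P.length : Int) = i then [P]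
        else [PySem.List.slice P none (some i)] ++ [PySem.List.slice P (some (-i)) none])
      (by intro acc x; split_ifs <;> simp_all)]
  rcases eq_or_ne P [] with h | h
  · subst h; simp [PySem.List.pyRange_one_eq_nil, pvBlocks]
  · have hn : 1 ≤ (P.length : Int) := by
      have := List.length_pos_iff.mpr h; omega
    rw [if_neg h, PySem.List.pyRange_one_succ_right hn, List.flatMap_append]
    simp only [List.nil_append, List.flatMap_cons, List.flatMap_nil, List.append_nil]
    simp only [if_true]
    congr 1
    rw [PySem.List.pyRange_one 1 (P.length : Int), List.flatMap_map]
    unfold pvBlocks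
    have hlen : ((P.length : Int) - 1).toNat = P.length - 1 := by omega
    rw [hlen]
    apply pv_flatMap_congr
    intro k hk
    simp only [List.mem_range] at hk
    have hne : (P.length : Int) ≠ 1 + (k : Int) := by omega
    have h1 : (1 + (k : Int)) = ((k + 1 : Nat) : Int) := by push_cast; ring
    rw [if_neg hne, h1, PySem.List.slice_to_natCast,
        PySem.List.slice_from_neg_natCast P (k + 1) (by omega)]
    rfl

-- loop invariant for B's single pass with growing accumulators
theorem pv_alt_invariant (P : List Int) (m : Nat) (hm : m ≤ P.length - 1) (hne : P ≠ []) :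
    (PySem.List.pyRange 0 ((m : Nat) : Int) 1).foldl
      (fun (st : List (List Int) × List Int × List Int) k =>
        let pref := st.2.1 ++ [PySem.List.pyGetD P k 0]
        let suf := [PySem.List.pyGetD P.reverse k 0] ++ st.2.2
        (st.1 ++ [pref] ++ [suf], pref, suf)) ([], [], [])
    = (pvBlocks P m, P.take m, P.drop (P.length - m)) := by
  induction m with
  | zero => simp [PySem.List.pyRange_one_eq_nil, pvBlocks, List.drop_length]
  | succ m ih =>
    have hlen : 0 < P.length := List.length_pos_iff.mpr hne
    have hmlt : m < P.length := by omega
    have hcast : (((m + 1 : Nat)) : Int) = ((m : Nat) : Int) + 1 := by push_cast; ring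
    rw [hcast, PySem.List.pyRange_one_succ_right (by positivity), List.foldl_append,
        ih (by omega)]
    simp only [List.foldl_cons, List.foldl_nil]
    have hpg : PySem.List.pyGetD P ((m : Nat) : Int) 0 = P[m] := by
      rw [PySem.List.pyGetD_natCast]; exact List.getD_eq_getElem P 0 hmlt
    have hrg : PySem.List.pyGetD P.reverse ((m : Nat) : Int) 0 = P[P.length - 1 - m] := by
      rw [PySem.List.pyGetD_natCast]
      rw [List.getD_eq_getElem P.reverse 0 (by simpa using hmlt)]
      rw [List.getElem_reverse]
    have hpref : P.take m ++ [P[m]] = P.take (m + 1) :=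
      (List.take_succ_eq_append_getElem hmlt).symm
    have hsuf : [P[P.length - 1 - m]] ++ P.drop (P.length - m) = P.drop (P.length - (m + 1)) := by
      have heq : P.length - (m + 1) = P.length - 1 - m := by omega
      rw [heq, List.drop_eq_getElem_cons (by omega : P.length - 1 - m < P.length)]
      have h3 : P.length - 1 - m + 1 = P.length - m := by omega
      rw [h3]; rfl
    have hblocks : pvBlocks P m ++ [P.take (m + 1)] ++ [P.drop (P.length - (m + 1))]
        = pvBlocks P (m + 1) := by
      unfold pvBlocks
      rw [List.range_succ, List.flatMap_append]
      simp
    rw [hpg, hrg, hpref, hsuf, hblocks]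

theorem takeAmountBeginAndEndPackage_alt_eq (P : List Int) :
    takeAmountBeginAndEndPackage_alt P =
      pvBlocks P (P.length - 1) ++ (if P = [] then [] else [P]) := by
  unfold takeAmountBeginAndEndPackage_alt
  rcases eq_or_ne P [] with h | h
  · subst h; simp [PySem.List.pyRange_one_eq_nil, pvBlocks]
  · have hlen : 0 < P.length := List.length_pos_iff.mpr h
    have hc : ((P.length : Int) - 1) = (((P.length - 1 : Nat)) : Int) := by omega
    simp only [hc]
    rw [pv_alt_invariant P (P.length - 1) (le_refl _) h]
    simp [h]

-- ===== VERDICT =====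
theorem takeAmountBeginAndEndPackage_spec : Claim_equal_takeAmountBeginAndEndPackage := by
  intro P _
  unfold Spec_takeAmountBeginAndEndPackage
  rw [takeAmountBeginAndEndPackage_eq, takeAmountBeginAndEndPackage_alt_eq]
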